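-- pv_equiv track=rewrite | github.com/deusexrenovatio-arch/trading-advisor-3000 | src/trading_advisor_3000/dagster_defs/phase2a_assets.py | _resolve_expected_materialization
-- ===== SOURCE A (Python) =====
-- from collections.abc import Sequence
--
-- PHASE2A_TABLES = (
--     "raw_market_backfill",
--     "canonical_bars",
--     "canonical_instruments",
--     "canonical_contracts",
--     "canonical_session_calendar",
--     "canonical_roll_map",
-- )
--
-- PHASE2A_DEPENDENCIES: dict[str, tuple[str, ...]] = {
--     "raw_market_backfill": tuple(),
--     "canonical_bars": ("raw_market_backfill",),
--     "canonical_instruments": ("raw_market_backfill",),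
--     "canonical_contracts": ("raw_market_backfill",),
--     "canonical_session_calendar": ("raw_market_backfill",),
--     "canonical_roll_map": ("raw_market_backfill",),
-- }
--
-- def _resolve_expected_materialization(selection: Sequence[str]) -> list[str]:
--     resolved: set[str] = set()
--
--     def _visit(asset_name: str) -> None:
--         if asset_name in resolved:
--             return
--         for dependency in PHASE2A_DEPENDENCIES.get(asset_name, tuple()):
--             _visit(dependency)
--         resolved.add(asset_name)
--
--     for asset_name in selection:
--         _visit(asset_name)
--     return [table_name for table_name in PHASE2A_TABLES if table_name in resolved]
-- ===== SOURCE B (Python) =====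
-- from collections.abc import Sequence
--
-- PHASE2A_TABLES = (
--     "raw_market_backfill",
--     "canonical_bars",
--     "canonical_instruments",
--     "canonical_contracts",
--     "canonical_session_calendar",
--     "canonical_roll_map",
-- )
--
-- PHASE2A_DEPENDENCIES: dict[str, tuple[str, ...]] = {
--     "raw_market_backfill": tuple(),
--     "canonical_bars": ("raw_market_backfill",),
--     "canonical_instruments": ("raw_market_backfill",),
--     "canonical_contracts": ("raw_market_backfill",),
--     "canonical_session_calendar": ("raw_market_backfill",),
--     "canonical_roll_map": ("raw_market_backfill",),
-- }
--
-- def _resolve_expected_materialization(selection: Sequence[str]) -> list[str]: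
--     # Level-by-level BFS: process a whole frontier per round, collecting the
--     # next frontier of unseen dependencies; same reachable closure as a DFS.
--     resolved: set[str] = set()
--     frontier = list(selection)
--     while frontier:
--         next_frontier: list[str] = []
--         for name in frontier:
--             if name not in resolved:
--                 resolved.add(name)
--                 next_frontier.extend(PHASE2A_DEPENDENCIES.get(name, ()))
--         frontier = next_frontier
--     return [t for t in PHASE2A_TABLES if t in resolved]
-- ===== Notes on version B (the rewrite author's own statement) =====
-- stated objective: alternative
-- what changed: Replaces the recursive per-name _visit closure with an iterative breadth-first traversal that processes whole frontier levels at a time, folding each level into (next_frontier, resolved) pair state.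
import Mathlib
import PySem

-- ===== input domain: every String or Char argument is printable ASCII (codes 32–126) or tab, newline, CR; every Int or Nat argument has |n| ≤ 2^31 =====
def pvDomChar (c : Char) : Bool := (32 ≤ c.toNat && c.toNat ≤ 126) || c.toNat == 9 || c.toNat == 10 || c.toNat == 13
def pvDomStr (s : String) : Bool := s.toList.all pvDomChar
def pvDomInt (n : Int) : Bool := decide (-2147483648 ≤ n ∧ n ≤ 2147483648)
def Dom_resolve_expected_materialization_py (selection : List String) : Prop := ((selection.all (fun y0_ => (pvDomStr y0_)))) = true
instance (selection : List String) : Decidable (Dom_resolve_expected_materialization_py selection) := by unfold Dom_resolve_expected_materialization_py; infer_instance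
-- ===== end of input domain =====

-- B replaces A's recursive _visit closure with a level-by-level breadth-first traversal
-- over explicit frontier lists (objective: alternative decomposition, no recursion per name).

-- module constants shared by both versions (PHASE2A_TABLES, PHASE2A_DEPENDENCIES)
def pvTables : List String :=
  ["raw_market_backfill", "canonical_bars", "canonical_instruments", "canonical_contracts",
   "canonical_session_calendar", "canonical_roll_map"]

def pvDepsDict : PySem.Dict String (List String) := PySem.Dict.ofList
  [("raw_market_backfill", []),
   ("canonical_bars", ["raw_market_backfill"]),
   ("canonical_instruments", ["raw_market_backfill"]),
   ("canonical_contracts", ["raw_market_backfill"]),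
   ("canonical_session_calendar", ["raw_market_backfill"]),
   ("canonical_roll_map", ["raw_market_backfill"])]

-- ===== PORT A =====
-- A's recursive _visit; the fuel argument only makes the recursion structural: the dependency
-- graph has depth ≤ 2, so fuel 2 per top-level call is never exhausted and the branch order,
-- the fold over the dependency tuple and the set operations are exactly A's.
def pvVisit : Nat → String → PySem.Set String → PySem.Set String
  | 0, _, resolved => resolved
  | fuel + 1, name, resolved =>
    if name ∈ resolved then resolved
    else PySem.Set.add
      ((PySem.Dict.getD pvDepsDict name []).foldl (fun r d => pvVisit fuel d r) resolved) name

def resolve_expected_materialization_py (selection : List String) : List String :=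
  let resolved := selection.foldl (fun r n => pvVisit 2 n r) PySem.Set.empty
  pvTables.filter (fun t => PySem.Set.contains resolved t)

-- ===== PORT B =====
-- B's inner `for name in frontier` loop: fold the frontier into the pair state
-- (next_frontier, resolved), exactly the two variables Source B's loop body updates.
def pvLevelStep (st : List String × PySem.Set String) (name : String) :
    List String × PySem.Set String :=
  if name ∈ st.2 then st
  else (st.1 ++ PySem.Dict.getD pvDepsDict name [], PySem.Set.add st.2 name)

-- B's outer `while frontier` loop; the fuel only bounds the rounds: every dependency chain
-- in the table has depth ≤ 2, so 3 rounds always reach the empty frontier.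
def pvBfs : Nat → List String → PySem.Set String → PySem.Set String
  | 0, _, resolved => resolved
  | _ + 1, [], resolved => resolved
  | fuel + 1, frontier, resolved =>
    let st := frontier.foldl pvLevelStep ([], resolved)
    pvBfs fuel st.1 st.2

def resolve_expected_materialization_py_alt (selection : List String) : List String :=
  let resolved := pvBfs 3 selection PySem.Set.empty
  pvTables.filter (fun t => PySem.Set.contains resolved t)

-- ===== PRECONDITION & SPEC =====
def Spec_resolve_expected_materialization_py (selection : List String) (out : List String) : Prop := out = resolve_expected_materialization_py_alt selection
instance (selection : List String) (out : List String) : Decidable (Spec_resolve_expected_materialization_py selection out) := by unfold Spec_resolve_expected_materialization_py; infer_instance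

-- ===== CLAIM (what is proved, stated in full; the proofs are below) =====
def Claim_equal_resolve_expected_materialization_py : Prop := ∀ (selection : List String), Dom_resolve_expected_materialization_py selection → Spec_resolve_expected_materialization_py selection (resolve_expected_materialization_py selection)

-- ===== LEMMAS AND PROOFS =====

-- the keys with a nonempty dependency tuple, and the one dependency they all have
def pvRaw : String := "raw_market_backfill"
def pvK : List String :=
  ["canonical_bars", "canonical_instruments", "canonical_contracts",
   "canonical_session_calendar", "canonical_roll_map"]

lemma pvDeps_eq (n : String) :
    PySem.Dict.getD pvDepsDict n [] = if n ∈ pvK then [pvRaw] else [] := by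
  by_cases h0 : n = "raw_market_backfill"
  · subst h0; decide
  by_cases h1 : n = "canonical_bars"
  · subst h1; decide
  by_cases h2 : n = "canonical_instruments"
  · subst h2; decide
  by_cases h3 : n = "canonical_contracts"
  · subst h3; decide
  by_cases h4 : n = "canonical_session_calendar"
  · subst h4; decide
  by_cases h5 : n = "canonical_roll_map"
  · subst h5; decide
  have hK : n ∉ pvK := by simp [pvK, h1, h2, h3, h4, h5]
  rw [if_neg hK]
  simp only [pvDepsDict, PySem.Dict.getD_eq_get?_getD, PySem.Dict.ofList, PySem.Dict.update,
    PySem.Dict.insert, PySem.Dict.empty, PySem.Dict.contains, PySem.Dict.get?]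
  simp [Ne.symm h0, Ne.symm h1, Ne.symm h2, Ne.symm h3, Ne.symm h4, Ne.symm h5]

lemma pvRaw_not_mem_K : pvRaw ∉ pvK := by decide

-- ==== A-side characterisation ====

-- "closed" invariant of A's resolved set: a resolved dependent name has its dependency resolved
def pvClosed (r : PySem.Set String) : Prop := ∀ m ∈ r, m ∈ pvK → pvRaw ∈ r

lemma pvVisit_two (n : String) (r : PySem.Set String) :
    pvVisit 2 n r = if n ∈ r then r
      else PySem.Set.add ((PySem.Dict.getD pvDepsDict n []).foldl (fun s d => pvVisit 1 d s) r) n := rfl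

lemma pvVisit_one_raw (r : PySem.Set String) :
    pvVisit 1 pvRaw r = if pvRaw ∈ r then r else PySem.Set.add r pvRaw := by
  show (if pvRaw ∈ r then r
      else PySem.Set.add ((PySem.Dict.getD pvDepsDict pvRaw []).foldl (fun s d => pvVisit 0 d s) r) pvRaw) = _
  rw [pvDeps_eq, if_neg pvRaw_not_mem_K]
  rfl

lemma pvVisit_mem (n : String) (r : PySem.Set String) (hr : pvClosed r) :
    (∀ x, x ∈ pvVisit 2 n r ↔ x ∈ r ∨ x = n ∨ (x = pvRaw ∧ n ∈ pvK)) ∧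
      pvClosed (pvVisit 2 n r) := by
  rw [pvVisit_two]
  by_cases hn : n ∈ r
  · rw [if_pos hn]
    refine ⟨fun x => ⟨fun h => Or.inl h, ?_⟩, hr⟩
    rintro (h | rfl | ⟨rfl, hK⟩)
    · exact h
    · exact hn
    · exact hr n hn hK
  · rw [if_neg hn, pvDeps_eq]
    by_cases hK : n ∈ pvK
    · rw [if_pos hK]
      simp only [List.foldl_cons, List.foldl_nil]
      have hmemv : ∀ x, x ∈ pvVisit 1 pvRaw r ↔ x ∈ r ∨ x = pvRaw := by
        intro x
        rw [pvVisit_one_raw]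
        by_cases hraw : pvRaw ∈ r
        · rw [if_pos hraw]
          exact ⟨fun h => Or.inl h, by rintro (h | rfl) <;> assumption⟩
        · rw [if_neg hraw]; exact PySem.Set.mem_add _ _ _
      constructor
      · intro x
        rw [PySem.Set.mem_add, hmemv]
        constructor
        · rintro ((h | rfl) | rfl)
          · exact Or.inl h
          · exact Or.inr (Or.inr ⟨rfl, hK⟩)
          · exact Or.inr (Or.inl rfl)
        · rintro (h | rfl | ⟨rfl, _⟩)
          · exact Or.inl (Or.inl h)
          · exact Or.inr rfl
          · exact Or.inl (Or.inr rfl)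
      · intro m hm _
        rw [PySem.Set.mem_add, hmemv] at hm ⊢
        exact Or.inl (Or.inr rfl)
    · rw [if_neg hK]
      simp only [List.foldl_nil]
      constructor
      · intro x
        rw [PySem.Set.mem_add]
        constructor
        · rintro (h | rfl)
          · exact Or.inl h
          · exact Or.inr (Or.inl rfl)
        · rintro (h | rfl | ⟨rfl, hK'⟩)
          · exact Or.inl h
          · exact Or.inr rfl
          · exact absurd hK' hK
      · intro m hm hmK
        rw [PySem.Set.mem_add] at hm ⊢
        rcases hm with hm | rfl
        · exact Or.inl (hr m hm hmK)
        · exact absurd hmK hK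

lemma pvFoldA_mem : ∀ (sel : List String) (r : PySem.Set String), pvClosed r →
    ∀ x, x ∈ sel.foldl (fun s n => pvVisit 2 n s) r ↔
      x ∈ r ∨ x ∈ sel ∨ (x = pvRaw ∧ ∃ s ∈ sel, s ∈ pvK)
  | [], r, _, x => by simp
  | n :: sel, r, hr, x => by
    simp only [List.foldl_cons]
    obtain ⟨hmem, hcl⟩ := pvVisit_mem n r hr
    rw [pvFoldA_mem sel _ hcl x, hmem x]
    simp only [List.mem_cons]
    constructor
    · rintro ((h | rfl | ⟨rfl, hK⟩) | h | ⟨rfl, s, hs, hsK⟩)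
      · exact Or.inl h
      · exact Or.inr (Or.inl (Or.inl rfl))
      · exact Or.inr (Or.inr ⟨rfl, n, Or.inl rfl, hK⟩)
      · exact Or.inr (Or.inl (Or.inr h))
      · exact Or.inr (Or.inr ⟨rfl, s, Or.inr hs, hsK⟩)
    · rintro (h | (rfl | h) | ⟨rfl, s, (rfl | hs), hsK⟩)
      · exact Or.inl (Or.inl h)
      · exact Or.inl (Or.inr (Or.inl rfl))
      · exact Or.inr (Or.inl h)
      · exact Or.inl (Or.inr (Or.inr ⟨rfl, hsK⟩))
      · exact Or.inr (Or.inr ⟨rfl, s, hs, hsK⟩)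

-- ==== B-side characterisation ====

-- one frontier pass: the resolved set gains exactly the frontier, and the next frontier
-- gains pvRaw exactly when some frontier name is a dependent not yet resolved
lemma pvLevelFold_mem : ∀ (frontier : List String) (nf : List String) (r : PySem.Set String),
    (∀ x, x ∈ (frontier.foldl pvLevelStep (nf, r)).2 ↔ x ∈ r ∨ x ∈ frontier) ∧
    (∀ x, x ∈ (frontier.foldl pvLevelStep (nf, r)).1 ↔
      x ∈ nf ∨ (x = pvRaw ∧ ∃ n ∈ frontier, n ∈ pvK ∧ n ∉ r))
  | [], nf, r => by simp
  | n :: fr, nf, r => by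
    simp only [List.foldl_cons, pvLevelStep]
    by_cases hn : n ∈ r
    · rw [if_pos hn]
      obtain ⟨h2, h1⟩ := pvLevelFold_mem fr nf r
      refine ⟨fun x => ?_, fun x => ?_⟩
      · rw [h2 x]; simp only [List.mem_cons]
        constructor
        · rintro (h | h)
          · exact Or.inl h
          · exact Or.inr (Or.inr h)
        · rintro (h | rfl | h)
          · exact Or.inl h
          · exact Or.inl hn
          · exact Or.inr h
      · rw [h1 x]; simp only [List.mem_cons]
        constructor
        · rintro (h | ⟨rfl, m, hm, hmK, hmr⟩)
          · exact Or.inl h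
          · exact Or.inr ⟨rfl, m, Or.inr hm, hmK, hmr⟩
        · rintro (h | ⟨rfl, m, (rfl | hm), hmK, hmr⟩)
          · exact Or.inl h
          · exact absurd hn hmr
          · exact Or.inr ⟨rfl, m, hm, hmK, hmr⟩
    · rw [if_neg hn, pvDeps_eq]
      have hadd : ∀ y, y ∈ PySem.Set.add r n ↔ y ∈ r ∨ y = n := PySem.Set.mem_add r n
      by_cases hK : n ∈ pvK
      · rw [if_pos hK]
        obtain ⟨h2, h1⟩ := pvLevelFold_mem fr (nf ++ [pvRaw]) (PySem.Set.add r n)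
        refine ⟨fun x => ?_, fun x => ?_⟩
        · rw [h2 x, hadd x]; simp only [List.mem_cons]
          tauto
        · rw [h1 x]
          simp only [List.mem_append, List.mem_cons, List.not_mem_nil, or_false]
          constructor
          · rintro ((h | rfl) | ⟨rfl, m, hm, hmK, hmr⟩)
            · exact Or.inl h
            · exact Or.inr ⟨rfl, n, Or.inl rfl, hK, hn⟩
            · exact Or.inr ⟨rfl, m, Or.inr hm, hmK, fun hc => hmr ((hadd m).2 (Or.inl hc))⟩
          · rintro (h | ⟨rfl, m, hm, hmK, hmr⟩)
            · exact Or.inl (Or.inl h)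
            · exact Or.inl (Or.inr rfl)
      · rw [if_neg hK]
        simp only [List.append_nil]
        obtain ⟨h2, h1⟩ := pvLevelFold_mem fr nf (PySem.Set.add r n)
        refine ⟨fun x => ?_, fun x => ?_⟩
        · rw [h2 x, hadd x]; simp only [List.mem_cons]
          tauto
        · rw [h1 x]; simp only [List.mem_cons]
          constructor
          · rintro (h | ⟨rfl, m, hm, hmK, hmr⟩)
            · exact Or.inl h
            · exact Or.inr ⟨rfl, m, Or.inr hm, hmK, fun hc => hmr ((hadd m).2 (Or.inl hc))⟩
          · rintro (h | ⟨rfl, m, (rfl | hm), hmK, hmr⟩)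
            · exact Or.inl h
            · exact absurd hmK hK
            · refine Or.inr ⟨rfl, m, hm, hmK, fun hc => ?_⟩
              rcases (hadd m).1 hc with h' | h'
              · exact hmr h'
              · exact hK (h' ▸ hmK)
  termination_by frontier => frontier.length

-- every element of the produced next frontier is pvRaw (when it starts from [])
lemma pvLevelFold_frontier_raw (frontier : List String) (r : PySem.Set String) :
    ∀ x ∈ (frontier.foldl pvLevelStep ([], r)).1, x = pvRaw := by
  intro x hx
  rcases ((pvLevelFold_mem frontier [] r).2 x).1 hx with h | ⟨rfl, _⟩
  · simp at h
  · rfl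

lemma pvBfs_nil (fuel : Nat) (r : PySem.Set String) : pvBfs fuel [] r = r := by
  cases fuel <;> rfl

lemma pvBfs_cons (fuel : Nat) (b : String) (fr : List String) (r : PySem.Set String) :
    pvBfs (fuel + 1) (b :: fr) r =
      pvBfs fuel ((b :: fr).foldl pvLevelStep ([], r)).1 ((b :: fr).foldl pvLevelStep ([], r)).2 := rfl

lemma pvBfs_mem (selection : List String) (x : String) :
    x ∈ pvBfs 3 selection PySem.Set.empty ↔
      x ∈ selection ∨ (x = pvRaw ∧ ∃ s ∈ selection, s ∈ pvK) := by
  cases selection with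
  | nil => simp [pvBfs, PySem.Set.empty]
  | cons a sel =>
    rw [pvBfs_cons]
    obtain ⟨hr1, hf1⟩ := pvLevelFold_mem (a :: sel) [] PySem.Set.empty
    cases hnf : ((a :: sel).foldl pvLevelStep ([], PySem.Set.empty)).1 with
    | nil =>
      rw [pvBfs_nil, hr1 x]
      have hno : ¬ ∃ s ∈ a :: sel, s ∈ pvK := by
        rintro ⟨s, hs, hsK⟩
        have : pvRaw ∈ ((a :: sel).foldl pvLevelStep ([], PySem.Set.empty)).1 :=
          (hf1 pvRaw).2 (Or.inr ⟨rfl, s, hs, hsK, by simp [PySem.Set.empty]⟩)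
        rw [hnf] at this; simp at this
      simp only [PySem.Set.empty]
      constructor
      · rintro (h | h)
        · simp at h
        · exact Or.inl h
      · rintro (h | ⟨rfl, s, hs, hsK⟩)
        · exact Or.inr h
        · exact absurd ⟨s, hs, hsK⟩ hno
    | cons b fr =>
      rw [pvBfs_cons]
      have hraw : ∀ y ∈ b :: fr, y = pvRaw := by
        intro y hy
        exact pvLevelFold_frontier_raw (a :: sel) PySem.Set.empty y (hnf ▸ hy)
      obtain ⟨hr2, hf2⟩ := pvLevelFold_mem (b :: fr) []
        ((a :: sel).foldl pvLevelStep ([], PySem.Set.empty)).2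
      have hnf2 : ((b :: fr).foldl pvLevelStep
          ([], ((a :: sel).foldl pvLevelStep ([], PySem.Set.empty)).2)).1 = [] := by
        apply List.eq_nil_iff_forall_not_mem.2
        intro y hy
        rcases (hf2 y).1 hy with h | ⟨rfl, m, hm, hmK, _⟩
        · simp at h
        · exact pvRaw_not_mem_K ((hraw m hm) ▸ hmK)
      rw [hnf2, pvBfs_nil, hr2 x, hr1 x]
      have hbraw : b = pvRaw := hraw b (List.mem_cons_self ..)
      have hbin : pvRaw ∈ ((a :: sel).foldl pvLevelStep ([], PySem.Set.empty)).1 := by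
        rw [hnf]; exact hbraw ▸ List.mem_cons_self ..
      obtain ⟨-, s, hs, hsK, -⟩ := ((hf1 pvRaw).1 hbin).resolve_left (by simp)
      simp only [PySem.Set.empty]
      constructor
      · rintro ((h | h) | hx)
        · simp at h
        · exact Or.inl h
        · exact Or.inr ⟨hraw x hx, s, hs, hsK⟩
      · rintro (h | ⟨rfl, _⟩)
        · exact Or.inl (Or.inr h)
        · exact Or.inr (hbraw ▸ List.mem_cons_self ..)

lemma pvResolved_same (selection : List String) (x : String) :
    (x ∈ selection.foldl (fun s n => pvVisit 2 n s) PySem.Set.empty ↔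
      x ∈ pvBfs 3 selection PySem.Set.empty) := by
  have hA := pvFoldA_mem selection PySem.Set.empty (by intro m hm; simp [PySem.Set.empty] at hm) x
  rw [hA, pvBfs_mem]
  simp [PySem.Set.empty]

-- ===== VERDICT (by name: the statement is the Claim_ definition above) =====
theorem resolve_expected_materialization_py_spec : Claim_equal_resolve_expected_materialization_py := by
  intro selection _
  unfold Spec_resolve_expected_materialization_py
  unfold resolve_expected_materialization_py resolve_expected_materialization_py_alt
  apply List.filter_congr
  intro t _
  have h := pvResolved_same selection t
  cases h1 : PySem.Set.contains (selection.foldl (fun s n => pvVisit 2 n s) PySem.Set.empty) t <;>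
  cases h2 : PySem.Set.contains (pvBfs 3 selection PySem.Set.empty) t <;>
    simp_all
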